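-- pv_equiv track=rewrite | github.com/chrisyates24/homework | Nugget problem improved.py | find_max_unbuyable
-- ===== SOURCE A (Python) =====
-- def solution_nuggets(amt, nuggets, i=None):
--     """
--     Return True if any whole multiples of pieces[:i+1] sum to amt, else False
--     """
--     if i is None:
--         i = len(nuggets) - 1   # start with last item
--     n = nuggets[i]
--     if i:
--         return any(solution_nuggets(amt - n*k,nuggets, i-1) for k in range(amt // n + 1))
--     else:
--         return amt % n == 0
--
-- def find_max_unbuyable(nuggets):
--     least = min(nuggets)
--     p = 0
--     last_unsolved = None
--     consecutive = 0
--     while consecutive < least: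
--         p += 1
--         if solution_nuggets(p, nuggets):
--             consecutive += 1
--         else:
--             last_unsolved = p
--             consecutive = 0
--     return last_unsolved
-- ===== SOURCE B (Python) =====
-- def find_max_unbuyable(nuggets):
--     least = min(nuggets)
--     if least < 1:
--         return None
--     # Boolean coin-reachability DP: buyable[p] <=> p is a sum of nuggets.
--     buyable = [True]
--     # Grow until the trailing `least` amounts are all buyable.
--     while len(buyable) <= least or not all(buyable[len(buyable) - least:]):
--         p = len(buyable)
--         buyable.append(any(n <= p and buyable[p - n] for n in nuggets))
--     # The answer is the largest amount left unbuyable.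
--     last_unsolved = None
--     for q in range(len(buyable)):
--         if not buyable[q]:
--             last_unsolved = q
--     return last_unsolved
-- ===== Notes on version B (the rewrite author's own statement) =====
-- stated objective: alternative
-- what changed: Replaces the exponential per-amount recursive search (solution_nuggets tries every multiple of every denomination) by a boolean coin-reachability DP table grown until the trailing run of `least` consecutive buyable amounts appears, then a single scan for the largest unbuyable amount.
import Mathlib
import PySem

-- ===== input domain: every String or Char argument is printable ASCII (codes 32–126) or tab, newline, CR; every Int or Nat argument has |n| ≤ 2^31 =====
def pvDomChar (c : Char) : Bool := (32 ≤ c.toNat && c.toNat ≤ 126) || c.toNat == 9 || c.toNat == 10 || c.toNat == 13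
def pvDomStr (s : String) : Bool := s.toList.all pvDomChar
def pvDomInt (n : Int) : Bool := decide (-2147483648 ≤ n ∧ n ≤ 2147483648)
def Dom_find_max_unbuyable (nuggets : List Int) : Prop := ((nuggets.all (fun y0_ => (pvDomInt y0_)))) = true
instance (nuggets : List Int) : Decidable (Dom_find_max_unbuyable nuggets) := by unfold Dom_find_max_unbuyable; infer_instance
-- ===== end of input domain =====

-- B replaces A's exponential recursive search per amount by a boolean coin-reachability DP
-- table plus one final scan (objective: alternative algorithm; return value equal on all of Pre_).


-- Fuel bound for the two while-loops: a guard that only makes them total. On every input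
-- admitted by Pre_ the Python loops stop after at most Frobenius+least < 2^62 = pvFuel
-- iterations, and the equivalence below is proved for EVERY fuel value, consumed in
-- lockstep by the two loops.
def pvFuel : Nat := 4611686018427387904

-- ===== PORT A =====
-- solution_nuggets(amt, nuggets, i): recursion on i; nuggets[i] is always in range when
-- called from find_max_unbuyable on a nonempty list, so getD is exact there.
def sol (ns : List Int) : Nat → Int → Bool
  | 0, amt => PySem.Int.mod amt (ns.getD 0 0) == 0
  | i+1, amt =>
    (PySem.List.pyRange 0 (PySem.Int.floordiv amt (ns.getD (i+1) 0) + 1) 1).any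
      (fun k => sol ns i (amt - ns.getD (i+1) 0 * k))

-- the while-loop of A, state (p, last_unsolved, consecutive)
def loopA (ns : List Int) (L : Int) : Nat → Int → Option Int → Int → Option Int
  | 0, _, last, _ => last
  | fuel+1, p, last, cons =>
    if cons < L then
      if sol ns (ns.length - 1) (p+1) then loopA ns L fuel (p+1) last (cons+1)
      else loopA ns L fuel (p+1) (some (p+1)) 0
    else last

def find_max_unbuyable (nuggets : List Int) : Option Int :=
  match PySem.List.min? nuggets (fun x => x) with
  | none => none   -- min([]) raises ValueError: outside Pre_
  | some least => loopA nuggets least pvFuel 0 none 0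

-- ===== PORT B =====
-- one DP extension: any(n <= p and buyable[p - n] for n in nuggets), p = len(buyable)
-- (when bStep runs, every n satisfies n ≥ least ≥ 1, so the index p - n is exact)
def bStep (ns : List Int) (b : List Bool) : Bool :=
  ns.any (fun n => decide (n ≤ (b.length : Int)) && PySem.List.pyGetD b ((b.length : Int) - n) false)

-- loop condition: len(buyable) <= least or not all(buyable[len(buyable)-least:])
def bCond (L : Int) (b : List Bool) : Bool :=
  decide ((b.length : Int) ≤ L) || !(PySem.List.slice b (some ((b.length : Int) - L)) none).all id

def bLoop (ns : List Int) (L : Int) : Nat → List Bool → List Bool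
  | 0, b => b
  | fuel+1, b => if bCond L b then bLoop ns L fuel (b ++ [bStep ns b]) else b

-- final scan: for q in range(len(buyable)): if not buyable[q]: last_unsolved = q
def bScan (b : List Bool) : Option Int :=
  (PySem.List.pyRange 0 (b.length : Int) 1).foldl
    (fun last q => if !(PySem.List.pyGetD b q false) then some q else last) none

def find_max_unbuyable_alt (nuggets : List Int) : Option Int :=
  match PySem.List.min? nuggets (fun x => x) with
  | none => none   -- min([]) raises ValueError: outside Pre_
  | some least =>
    if least < 1 then none
    else bScan (bLoop nuggets least pvFuel [true])

-- ===== PRECONDITION & SPEC =====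
-- Pre_ excludes exactly the inputs where Python A does not return: the empty list
-- (min([]) raises ValueError) and lists with min ≥ 1 whose gcd is > 1 (every buyable
-- amount is a multiple of the gcd, so a run of `least` ≥ 2 consecutive buyable amounts
-- never appears and A's while-loop diverges).
def Pre_find_max_unbuyable (nuggets : List Int) : Prop :=
  nuggets ≠ [] ∧ ((∃ x ∈ nuggets, x ≤ 0) ∨ nuggets.foldr (fun a g => Nat.gcd a.natAbs g) 0 = 1)
instance (nuggets : List Int) : Decidable (Pre_find_max_unbuyable nuggets) := by
  unfold Pre_find_max_unbuyable; infer_instance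

def pvWitness_find_max_unbuyable : List Int := [6, 10, 15]

def Spec_find_max_unbuyable (nuggets : List Int) (out : Option Int) : Prop := out = find_max_unbuyable_alt nuggets
instance (nuggets : List Int) (out : Option Int) : Decidable (Spec_find_max_unbuyable nuggets out) := by unfold Spec_find_max_unbuyable; infer_instance

-- ===== CLAIM (what is proved, stated in full; the proofs are below) =====
def Claim_equal_find_max_unbuyable : Prop := ∀ (nuggets : List Int), Dom_find_max_unbuyable nuggets → Pre_find_max_unbuyable nuggets → Spec_find_max_unbuyable nuggets (find_max_unbuyable nuggets)

-- ===== LEMMAS AND PROOFS =====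

-- `buy ns j` = what A's solution_nuggets(j, ns) returns: "amount j is buyable"
def buy (ns : List Int) (j : Nat) : Bool := sol ns (ns.length - 1) (j : Int)

-- "amt is a sum of elements of ns (with repetition)"
def Reach (ns : List Int) (amt : Int) : Prop :=
  ∃ l : List Int, (∀ x ∈ l, x ∈ ns) ∧ l.sum = amt

lemma filter_sum_split (l : List Int) (f : Int → Bool) :
    (l.filter f).sum + (l.filter (fun x => !f x)).sum = l.sum := by
  induction l with
  | nil => simp
  | cons x t ih => by_cases h : f x <;> simp [h] <;> omega

lemma sol_correct (ns : List Int) (hpos : ∀ x ∈ ns, 1 ≤ x) :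
    ∀ (i : Nat), i < ns.length → ∀ amt : Int, 0 ≤ amt →
    (sol ns i amt = true ↔ ∃ l : List Int, (∀ x ∈ l, x ∈ ns.take (i+1)) ∧ l.sum = amt) := by
  intro i
  induction i with
  | zero =>
    intro hi amt ha
    have hn : ns.getD 0 0 = ns[0] := List.getD_eq_getElem ns 0 hi
    have hn1 : (1:Int) ≤ ns[0] := hpos _ (ns.getElem_mem hi)
    have htake : ns.take 1 = [ns[0]] := by
      cases ns with
      | nil => simp at hi
      | cons a t => simp
    simp only [sol, hn, htake, beq_iff_eq, PySem.Int.mod_eq_zero_iff_dvd]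
    constructor
    · rintro ⟨k, hk⟩
      have hk0 : 0 ≤ k := by nlinarith
      refine ⟨List.replicate k.toNat ns[0], ?_, ?_⟩
      · intro x hx; simp [List.eq_of_mem_replicate hx]
      · simp [List.sum_replicate, Int.toNat_of_nonneg hk0, hk, mul_comm]
    · rintro ⟨l, hl, rfl⟩
      have : ∀ x ∈ l, x = ns[0] := by intro x hx; simpa using hl x hx
      rw [List.sum_eq_card_nsmul l _ this]
      simp
  | succ i ih =>
    intro hi amt ha
    have hi' : i < ns.length := by omega
    have hn : ns.getD (i+1) 0 = ns[i+1] := List.getD_eq_getElem ns 0 hi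
    have hn1 : (1:Int) ≤ ns[i+1] := hpos _ (ns.getElem_mem hi)
    have htake : ns.take (i+1+1) = ns.take (i+1) ++ [ns[i+1]] := by
      simp [List.take_add_one, List.getElem?_eq_getElem hi]
    simp only [sol, hn, List.any_eq_true]
    constructor
    · rintro ⟨k, hkmem, hsol⟩
      rw [PySem.List.mem_pyRange_one] at hkmem
      obtain ⟨hk0, hklt⟩ := hkmem
      have hkle : k ≤ PySem.Int.floordiv amt ns[i+1] := by omega
      have hkn : k * ns[i+1] ≤ amt := (PySem.Int.le_floordiv_iff_mul_le (by omega)).1 hkle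
      have ha' : 0 ≤ amt - ns[i+1] * k := by nlinarith
      obtain ⟨l, hl, hsum⟩ := (ih hi' _ ha').1 hsol
      refine ⟨l ++ List.replicate k.toNat ns[i+1], ?_, ?_⟩
      · intro x hx
        rw [htake]
        rcases List.mem_append.1 hx with h | h
        · exact List.mem_append.2 (Or.inl (hl x h))
        · rw [List.eq_of_mem_replicate h]
          exact List.mem_append.2 (Or.inr (by simp))
      · rw [List.sum_append, hsum, List.sum_replicate, nsmul_eq_mul,
            Int.toNat_of_nonneg hk0]
        ring
    · rintro ⟨l, hl, rfl⟩
      set n := ns[i+1] with hn'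
      set l1 := l.filter (fun x => !(x == n)) with hl1
      set l2 := l.filter (fun x => x == n) with hl2
      have hsplit : l2.sum + l1.sum = l.sum := filter_sum_split l _
      have hl2all : ∀ x ∈ l2, x = n := by
        intro x hx; have := List.of_mem_filter hx; simpa using this
      have hl2sum : l2.sum = (l2.length : Int) * n := by
        rw [List.sum_eq_card_nsmul l2 n hl2all]; simp
      have hl1mem : ∀ x ∈ l1, x ∈ ns.take (i+1) := by
        intro x hx
        have hxl : x ∈ l := List.mem_of_mem_filter hx
        have hxne : ¬(x = n) := by
          have := List.of_mem_filter hx; simpa using this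
        have := hl x hxl
        rw [htake] at this
        rcases List.mem_append.1 this with h | h
        · exact h
        · simp at h; exact absurd h hxne
      have hl1pos : 0 ≤ l1.sum := by
        apply List.sum_nonneg
        intro x hx
        have hxns : x ∈ ns := List.take_subset _ _ (hl1mem x hx)
        have := hpos x hxns; omega
      have hle : (l2.length : Int) * n ≤ l.sum := by
        rw [hl2sum] at hsplit; omega
      have hrest : l.sum - n * (l2.length : Int) = l1.sum := by
        rw [hl2sum] at hsplit; rw [mul_comm] at hle ⊢; omega
      refine ⟨(l2.length : Int), ?_, ?_⟩
      · rw [PySem.List.mem_pyRange_one]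
        refine ⟨by positivity, ?_⟩
        have : (l2.length : Int) ≤ PySem.Int.floordiv l.sum n := by
          rw [PySem.Int.le_floordiv_iff_mul_le (by omega)]
          exact hle
        omega
      · apply (ih hi' _ (by rw [hrest]; exact hl1pos)).2
        exact ⟨l1, hl1mem, hrest.symm⟩

lemma buy_iff (ns : List Int) (hne : ns ≠ []) (hpos : ∀ x ∈ ns, 1 ≤ x) (j : Nat) :
    (buy ns j = true ↔ Reach ns (j : Int)) := by
  have hlen : 0 < ns.length := List.length_pos_iff.2 hne
  have h := sol_correct ns hpos (ns.length - 1) (by omega) (j : Int) (by positivity)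
  rw [show ns.length - 1 + 1 = ns.length by omega, List.take_length] at h
  exact h

lemma reach_step (ns : List Int) (hpos : ∀ x ∈ ns, 1 ≤ x) (q : Int) (hq : 1 ≤ q) :
    Reach ns q ↔ ∃ n ∈ ns, n ≤ q ∧ Reach ns (q - n) := by
  constructor
  · rintro ⟨l, hmem, rfl⟩
    cases l with
    | nil => simp at hq
    | cons x t =>
      have hts : 0 ≤ t.sum := List.sum_nonneg (fun y hy => by
        have := hpos y (hmem y (List.mem_cons_of_mem x hy)); omega)
      have hxq : x ≤ (x :: t).sum := by simp; omega
      exact ⟨x, hmem x List.mem_cons_self, hxq,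
        ⟨t, fun y hy => hmem y (List.mem_cons_of_mem x hy), by simp⟩⟩
  · rintro ⟨n, hn, hle, ⟨l, hl, hs⟩⟩
    refine ⟨n :: l, ?_, by simp [hs]⟩
    intro x hx
    rcases List.mem_cons.1 hx with rfl | h
    · exact hn
    · exact hl x h

lemma bStep_eq (ns : List Int) (hne : ns ≠ []) (hpos : ∀ x ∈ ns, 1 ≤ x) (P : Nat) :
    bStep ns ((List.range (P+1)).map (buy ns)) = buy ns (P+1) := by
  set b := (List.range (P+1)).map (buy ns) with hb
  have hblen : b.length = P + 1 := by simp [hb]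
  have hbget : ∀ j : Nat, j < P + 1 → b.getD j false = buy ns j := by
    intro j hj
    rw [hb, List.getD_eq_getElem _ _ (by simpa using hj)]
    simp
  rw [Bool.eq_iff_iff]
  rw [buy_iff ns hne hpos (P+1)]
  rw [show ((P+1 : Nat) : Int) = (P : Int) + 1 by push_cast; ring]
  rw [reach_step ns hpos _ (by omega)]
  unfold bStep
  rw [List.any_eq_true]
  constructor
  · rintro ⟨n, hn, hcond⟩
    rw [Bool.and_eq_true, decide_eq_true_iff] at hcond
    obtain ⟨hle, hget⟩ := hcond
    rw [hblen] at hle hget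
    push_cast at hle hget
    have h1n : 1 ≤ n := hpos n hn
    have hidx : ((P:Int) + 1 - n) = (((P + 1 - n.toNat : Nat)) : Int) := by omega
    rw [hidx, PySem.List.pyGetD_natCast, hbget _ (by omega)] at hget
    refine ⟨n, hn, by omega, ?_⟩
    rw [show (P:Int) + 1 - n = ((P + 1 - n.toNat : Nat) : Int) from hidx]
    exact (buy_iff ns hne hpos _).1 hget
  · rintro ⟨n, hn, hle, hreach⟩
    have h1n : 1 ≤ n := hpos n hn
    refine ⟨n, hn, ?_⟩
    rw [Bool.and_eq_true, decide_eq_true_iff]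
    rw [hblen]; push_cast
    refine ⟨by omega, ?_⟩
    have hidx : ((P:Int) + 1 - n) = (((P + 1 - n.toNat : Nat)) : Int) := by omega
    rw [hidx, PySem.List.pyGetD_natCast, hbget _ (by omega)]
    apply (buy_iff ns hne hpos _).2
    rwa [← hidx]

lemma bScan_append (b : List Bool) (ok : Bool) :
    bScan (b ++ [ok]) = if ok then bScan b else some (b.length : Int) := by
  unfold bScan
  have hlen : ((b ++ [ok]).length : Int) = (b.length : Int) + 1 := by simp
  rw [hlen, PySem.List.pyRange_one_succ_right (by positivity), List.foldl_append]
  have hget : PySem.List.pyGetD (b ++ [ok]) (b.length : Int) false = ok := by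
    rw [PySem.List.pyGetD_natCast]
    simp [List.getD]
  have hcong : (PySem.List.pyRange 0 (b.length:Int) 1).foldl
      (fun last q => if !(PySem.List.pyGetD (b ++ [ok]) q false) then some q else last) none
      = (PySem.List.pyRange 0 (b.length:Int) 1).foldl
      (fun last q => if !(PySem.List.pyGetD b q false) then some q else last) none := by
    apply PySem.List.foldl_congr_mem
    intro acc q hq
    rw [PySem.List.mem_pyRange_one] at hq
    have hq2 : q.toNat < b.length := by omega
    have : PySem.List.pyGetD (b ++ [ok]) q false = PySem.List.pyGetD b q false := by
      rw [PySem.List.pyGetD_eq_getElem (b ++ [ok]) false hq.1 (by simp; omega),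
          PySem.List.pyGetD_eq_getElem b false hq.1 (by exact_mod_cast hq.2),
          List.getElem_append_left hq2]
    rw [this]
  rw [hcong]
  simp only [List.foldl_cons, List.foldl_nil]
  rw [hget]
  cases ok <;> simp

lemma bCond_iff (ns : List Int) (L : Int) (hL : 1 ≤ L) (p cons : Int)
    (hp : 0 ≤ p) (hc0 : 0 ≤ cons) (hcp : cons ≤ p)
    (hrun : ∀ j : Int, p - cons < j → j ≤ p → buy ns j.toNat = true)
    (hfalse : cons = p ∨ buy ns (p - cons).toNat = false) :
    (bCond L ((List.range (p.toNat+1)).map (buy ns)) = true ↔ cons < L) := by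
  set b := (List.range (p.toNat+1)).map (buy ns) with hb
  have hblen : b.length = p.toNat + 1 := by simp [hb]
  have hbget : ∀ j : Nat, (hj : j < p.toNat + 1) → b[j]'(by rw [hblen]; exact hj) = buy ns j := by
    intro j hj; simp [hb]
  unfold bCond
  rw [hblen]
  by_cases hpl : (↑(p.toNat + 1) : Int) ≤ L
  · simp only [hpl, decide_true, Bool.true_or, true_iff]
    omega
  · simp only [hpl, decide_false, Bool.false_or]
    have hst : 0 ≤ (↑(p.toNat + 1) : Int) - L := by omega
    rw [PySem.List.slice_from b hst]
    set s : Nat := ((↑(p.toNat + 1) : Int) - L).toNat with hs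
    have hsval : (s : Int) = p + 1 - L := by omega
    have hdlen : (b.drop s).length = b.length - s := List.length_drop ..
    constructor
    · intro hall
      rw [Bool.not_eq_eq_eq_not, Bool.not_true, List.all_eq_false] at hall
      obtain ⟨x, hxmem, hxf⟩ := hall
      obtain ⟨k, hk, hxk⟩ := List.mem_iff_getElem.1 hxmem
      rw [List.getElem_drop] at hxk
      have hj : s + k < p.toNat + 1 := by omega
      rw [hbget (s + k) hj] at hxk
      by_contra hcl
      have hcast : (((s:Int) + k)).toNat = s + k := by omega
      have htr : buy ns (s + k) = true := by
        have := hrun ((s : Int) + k) (by omega) (by omega)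
        rwa [hcast] at this
      rw [htr] at hxk
      exact hxf (by simp [← hxk])
    · intro hcl
      rw [Bool.not_eq_eq_eq_not, Bool.not_true, List.all_eq_false]
      have hcpne : cons ≠ p := by omega
      have hbuyf : buy ns (p - cons).toNat = false := hfalse.resolve_left hcpne
      have hk : s ≤ (p - cons).toNat := by omega
      have hklt : (p - cons).toNat < b.length := by omega
      refine ⟨false, ?_, by simp⟩
      rw [List.mem_iff_getElem]
      refine ⟨(p - cons).toNat - s, by omega, ?_⟩
      rw [List.getElem_drop]
      have harg : s + ((p - cons).toNat - s) = (p - cons).toNat := by omega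
      simp only [harg]
      rw [hbget _ (by omega)]
      exact hbuyf

lemma loopA_exit (ns : List Int) (L p cons : Int) (last : Option Int) (h : ¬ cons < L) :
    ∀ fuel, loopA ns L fuel p last cons = last := by
  intro fuel; cases fuel <;> simp [loopA, h]

lemma main_loop (ns : List Int) (L : Int) (hne : ns ≠ []) (hL : 1 ≤ L)
    (hpos : ∀ x ∈ ns, 1 ≤ x) :
    ∀ (fuel : Nat) (p cons : Int) (last : Option Int) (b : List Bool),
    0 ≤ p → b = (List.range (p.toNat+1)).map (buy ns) → bScan b = last →
    0 ≤ cons → cons ≤ p →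
    (∀ j : Int, p - cons < j → j ≤ p → buy ns j.toNat = true) →
    (cons = p ∨ buy ns (p - cons).toNat = false) →
    loopA ns L fuel p last cons = bScan (bLoop ns L fuel b) := by
  intro fuel
  induction fuel with
  | zero =>
    intro p cons last b hp hb hscan hc0 hcp hrun hfalse
    simp [loopA, bLoop, hscan]
  | succ fuel ih =>
    intro p cons last b hp hb hscan hc0 hcp hrun hfalse
    have hcond := bCond_iff ns L hL p cons hp hc0 hcp hrun hfalse
    rw [← hb] at hcond
    have hblen : b.length = p.toNat + 1 := by simp [hb]
    show (if cons < L then _ else last) = bScan (if bCond L b then bLoop ns L fuel (b ++ [bStep ns b]) else b)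
    by_cases hcl : cons < L
    · rw [if_pos hcl, if_pos (hcond.2 hcl)]
      have hcast : ((p.toNat + 1 : Nat) : Int) = p + 1 := by omega
      have hok : sol ns (ns.length - 1) (p+1) = buy ns (p.toNat+1) := by
        unfold buy; rw [hcast]
      have hstep : bStep ns b = buy ns (p.toNat+1) := by
        rw [hb]; exact bStep_eq ns hne hpos p.toNat
      have hb' : b ++ [bStep ns b] = (List.range ((p+1).toNat+1)).map (buy ns) := by
        have h2 : (p+1).toNat + 1 = (p.toNat + 1) + 1 := by omega
        rw [hstep, hb, h2]
        conv_rhs => rw [List.range_succ]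
        simp
      have hscan' := bScan_append b (bStep ns b)
      by_cases hbuy : buy ns (p.toNat+1) = true
      · rw [hok, hbuy, if_pos rfl]
        apply ih (p+1) (cons+1) last _ (by omega) hb'
        · rw [hscan', hstep, hbuy]; simpa using hscan
        · omega
        · omega
        · intro j h1 h2
          by_cases hj : j ≤ p
          · exact hrun j (by omega) hj
          · have : j = p + 1 := by omega
            subst this
            have : (p+1).toNat = p.toNat + 1 := by omega
            rw [this]; exact hbuy
        · rcases hfalse with h | h
          · exact Or.inl (by omega)
          · exact Or.inr (by rw [show p + 1 - (cons + 1) = p - cons by ring]; exact h)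
      · have hbuyf : buy ns (p.toNat+1) = false := by simpa using hbuy
        rw [hok, hbuyf, if_neg (by simp)]
        apply ih (p+1) 0 (some (p+1)) _ (by omega) hb'
        · rw [hscan', hstep, hbuyf, hblen]
          simp only [Bool.false_eq_true, if_false, Option.some.injEq]
          omega
        · omega
        · omega
        · intro j h1 h2; omega
        · exact Or.inr (by rw [show p + 1 - 0 = ((p.toNat + 1 : Nat) : Int) by omega, Int.toNat_natCast]; exact hbuyf)
    · rw [if_neg hcl, if_neg (fun h => hcl (hcond.1 h))]
      exact hscan.symm

-- ===== VERDICT (by name: the statement is the Claim_ definition above) =====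
theorem find_max_unbuyable_spec : Claim_equal_find_max_unbuyable := by
  intro nuggets _hdom _hpre
  unfold Spec_find_max_unbuyable find_max_unbuyable find_max_unbuyable_alt
  cases hmin : PySem.List.min? nuggets (fun x => x) with
  | none => rfl
  | some L =>
    simp only []
    have hLmem : L ∈ nuggets := PySem.List.min?_mem hmin
    have hLmin : ∀ y ∈ nuggets, L ≤ y := PySem.List.min?_isMin hmin
    have hne : nuggets ≠ [] := by rintro rfl; simp at hLmem
    by_cases hL1 : L < 1
    · rw [if_pos hL1]
      exact loopA_exit nuggets L 0 0 none (by omega) pvFuel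
    · rw [if_neg hL1]
      have hL : 1 ≤ L := by omega
      have hpos : ∀ x ∈ nuggets, 1 ≤ x := fun x hx => le_trans hL (hLmin x hx)
      have hbuy0 : buy nuggets 0 = true := by
        rw [buy_iff nuggets hne hpos 0]
        exact ⟨[], by simp, by simp⟩
      apply main_loop nuggets L hne hL hpos pvFuel 0 0 none [true] (by omega)
      · simp [List.range_succ, hbuy0]
      · decide
      · omega
      · omega
      · intro j h1 h2; omega
      · exact Or.inl rfl
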